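-- pv_equiv track=rewrite | github.com/varunamespace/leetcode | prime.py | primee
-- ===== SOURCE A (Python) =====
-- def primee(A):
--     dict = {}
--     tocheck = []
--     ans = []
--     for i in A:
--         if i not in dict:
--             dict[i] = 1
--         else:
--             dict[i] = dict[i] + 1
--     for i in dict:
--         if dict[i]>1:
--             tocheck.append(i)
--     def check(n):
--         for i in range(2,n):
--             if n%i==0:
--                 return False
--         return True
--     for i in tocheck:
--         if(check(i)):
--             ans.append(i)
--     return sorted(ans)
-- ===== SOURCE B (Python) =====
-- def primee(A):
--     s = sorted(A)
--     dups = []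
--     p1 = None
--     p2 = None
--     for v in s:
--         if v == p1 and v != p2:
--             dups.append(v)
--         p2 = p1
--         p1 = v
--     def check(n):
--         for i in range(2, n):
--             if n % i == 0:
--                 return False
--         return True
--     return [v for v in dups if check(v)]
-- ===== Notes on version B (the rewrite author's own statement) =====
-- stated objective: alternative
-- what changed: Replaces the dict-counting pass plus final sort with sort-first and a single linear scan over the sorted copy that emits each duplicated value once (already in order), keeping the same naive trial-division check.
import Mathlib
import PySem

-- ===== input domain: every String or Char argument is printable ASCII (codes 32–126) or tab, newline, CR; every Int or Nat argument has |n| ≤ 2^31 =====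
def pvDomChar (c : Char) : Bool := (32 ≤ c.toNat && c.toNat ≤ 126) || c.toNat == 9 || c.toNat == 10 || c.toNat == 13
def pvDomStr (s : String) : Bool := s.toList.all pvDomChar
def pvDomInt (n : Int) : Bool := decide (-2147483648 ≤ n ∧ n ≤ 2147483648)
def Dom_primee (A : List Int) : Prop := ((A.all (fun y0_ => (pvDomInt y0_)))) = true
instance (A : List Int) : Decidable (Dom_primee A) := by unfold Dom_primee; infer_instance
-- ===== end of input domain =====

-- B replaces A's dict-counting pass plus final sort by sort-first and one linear scan
-- that emits each duplicated value once, already in order; same naive trial-division check.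

-- ===== PORT A =====
-- check(n): trial division over range(2, n); True for n < 2 (helper shared verbatim by both Pythons)
def pcheck (n : Int) : Bool := (PySem.List.pyRange 2 n 1).all (fun i => !(PySem.Int.mod n i == 0))

def primee (A : List Int) : List Int :=
  let d := A.foldl (fun d i =>
      if d.contains i = false then d.insert i 1 else d.insert i (d.getD i 0 + 1))
    PySem.Dict.empty
  let tocheck := d.keys.filter (fun i => decide ((1:Int) < d.getD i 0))
  let ans := tocheck.filter pcheck
  PySem.List.sorted ans (fun x => x) false

-- ===== PORT B =====
-- the scan: p1 = previous element, p2 = the one before it; emit v on 'v == p1 and v != p2'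
def bGo : List Int → Option Int → Option Int → List Int
  | [], _, _ => []
  | v :: rest, p1, p2 =>
      (if some v = p1 ∧ some v ≠ p2 then [v] else []) ++ bGo rest (some v) p1

def primee_alt (A : List Int) : List Int :=
  let s := PySem.List.sorted A (fun x => x) false
  (bGo s none none).filter pcheck

-- ===== PRECONDITION & SPEC =====
def Spec_primee (A : List Int) (out : List Int) : Prop := out = primee_alt A
instance (A : List Int) (out : List Int) : Decidable (Spec_primee A out) := by unfold Spec_primee; infer_instance

-- ===== CLAIM (what is proved, stated in full; the proofs are below) =====
def Claim_equal_primee : Prop := ∀ (A : List Int), Dom_primee A → Spec_primee A (primee A)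

-- ===== LEMMAS AND PROOFS =====

-- membership in the scan's output, for a sorted suffix s with state (p1, p2), p1 ≤ everything in s
theorem bGo_mem (s : List Int) (p1 p2 : Option Int)
    (hs : s.Pairwise (· ≤ ·)) (hp : ∀ a, p1 = some a → ∀ y ∈ s, a ≤ y) (v : Int) :
    v ∈ bGo s p1 p2 ↔
      ((p1 = some v ∧ p2 ≠ some v ∧ 1 ≤ s.count v) ∨ (p1 ≠ some v ∧ 2 ≤ s.count v)) := by
  induction s generalizing p1 p2 with
  | nil => simp [bGo]
  | cons x rest ih =>
      rcases List.pairwise_cons.mp hs with ⟨hx, hrest⟩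
      have hp' : ∀ a, some x = some a → ∀ y ∈ rest, a ≤ y := by
        rintro a ha y hy
        cases ha
        exact hx y hy
      have ihr := ih (some x) p1 hrest hp'
      have hnotin : ∀ w, p1 = some w → w ≠ x → rest.count w = 0 := by
        intro w hw hwx
        by_contra h
        have hmem : w ∈ rest := List.count_pos_iff.mp (Nat.pos_of_ne_zero h)
        have h1 : x ≤ w := hx w hmem
        have h2 : w ≤ x := hp w hw x List.mem_cons_self
        exact hwx (le_antisymm h2 h1)
      simp only [bGo, List.mem_append, ihr, List.count_cons]
      by_cases hv : v = x
      · subst hv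
        by_cases hp1 : p1 = some v <;> by_cases hp2 : p2 = some v <;>
          simp_all
        · exact fun h => hp2 h.symm
        · exact fun h _ => absurd h.symm hp1
      · have hne : (v == x) = false := by simp [hv]
        by_cases hp1 : p1 = some v
        · have := hnotin v hp1 hv
          simp_all [Ne.symm hv]
        · by_cases hp1x : p1 = some x <;> simp_all [Ne.symm hv]

-- the scan's output is strictly increasing
theorem bGo_pairwise (s : List Int) (p1 p2 : Option Int)
    (hs : s.Pairwise (· ≤ ·)) (hp : ∀ a, p1 = some a → ∀ y ∈ s, a ≤ y) :
    (bGo s p1 p2).Pairwise (· < ·) := by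
  induction s generalizing p1 p2 with
  | nil => simp [bGo]
  | cons x rest ih =>
      rcases List.pairwise_cons.mp hs with ⟨hx, hrest⟩
      have hp' : ∀ a, some x = some a → ∀ y ∈ rest, a ≤ y := by
        rintro a ha y hy
        cases ha
        exact hx y hy
      have ihr := ih (some x) p1 hrest hp'
      by_cases hc : some x = p1 ∧ some x ≠ p2
      · simp only [bGo, if_pos hc, List.singleton_append, List.pairwise_cons]
        refine ⟨?_, ihr⟩
        intro y hy
        rcases (bGo_mem rest (some x) p1 hrest hp' y).mp hy with h | h
        · exact absurd (hc.1.symm.trans h.1) h.2.1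
        · have hmem : y ∈ rest := List.count_pos_iff.mp (by omega)
          have : x ≠ y := fun he => h.1 (by rw [he])
          exact lt_of_le_of_ne (hx y hmem) this
      · simpa only [bGo, if_neg hc, List.nil_append] using ihr

-- ===== VERDICT (by name: the statement is the Claim_ definition above) =====
theorem primee_spec : Claim_equal_primee := by
  intro A _
  unfold Spec_primee primee primee_alt
  -- A's counting loop is the uniform counter fold
  have hfun : (fun (d : PySem.Dict Int Int) (i : Int) =>
      if d.contains i = false then d.insert i 1 else d.insert i (d.getD i 0 + 1)) =
      (fun d i => d.insert i (d.getD i 0 + 1)) := by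
    funext d i
    by_cases h : d.contains i = false
    · rw [if_pos h, PySem.Dict.getD_of_not_contains d 0 h]
      norm_num
    · rw [if_neg h]
  rw [hfun]
  set d := A.foldl (fun (d : PySem.Dict Int Int) i => d.insert i (d.getD i 0 + 1)) PySem.Dict.empty with hd
  have hgetD : ∀ v, d.getD v 0 = (A.count v : Int) := by
    intro v
    rw [hd, PySem.Dict.getD_foldl_insert_add_one, PySem.Dict.getD_empty]
    ring
  have hkeys : d.keys = PySem.Set.ofList A := by
    rw [hd, PySem.Dict.keys_foldl_insert, PySem.Dict.keys_empty, PySem.Set.update_nil_left]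
  -- the sorted copy B scans
  set s := PySem.List.sorted A (fun x => x) false with hsdef
  have hsp : s.Pairwise (· ≤ ·) := PySem.List.sorted_pairwise A (fun x => x)
  have hcount : ∀ v, s.count v = A.count v := fun v =>
    (PySem.List.sorted_perm A (fun x => x) false).count_eq v
  have hmemB : ∀ v, v ∈ bGo s none none ↔ 2 ≤ A.count v := by
    intro v
    rw [bGo_mem s none none hsp (by intro a ha; cases ha) v, hcount]
    simp
  have hpwB : ((bGo s none none).filter pcheck).Pairwise (· < ·) :=
    (bGo_pairwise s none none hsp (by intro a ha; cases ha)).filter pcheck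
  have hndB : ((bGo s none none).filter pcheck).Nodup :=
    hpwB.imp (fun h => ne_of_lt h)
  -- A's candidate list
  have hmemA : ∀ v, v ∈ (d.keys.filter (fun i => decide ((1:Int) < d.getD i 0))).filter pcheck ↔
      (2 ≤ A.count v ∧ pcheck v = true) := by
    intro v
    rw [List.mem_filter, List.mem_filter, hkeys]
    constructor
    · rintro ⟨⟨-, h1⟩, h2⟩
      refine ⟨?_, h2⟩
      have := of_decide_eq_true h1
      rw [hgetD] at this
      omega
    · rintro ⟨h1, h2⟩
      have hvA : v ∈ A := List.count_pos_iff.mp (by omega)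
      refine ⟨⟨(PySem.Set.mem_ofList A v).mpr hvA, ?_⟩, h2⟩
      rw [decide_eq_true_iff, hgetD]
      omega
  have hndA : ((d.keys.filter (fun i => decide ((1:Int) < d.getD i 0))).filter pcheck).Nodup := by
    rw [hkeys]
    exact ((PySem.Set.nodup_ofList A).filter _).filter _
  have hperm : ((bGo s none none).filter pcheck).Perm
      ((d.keys.filter (fun i => decide ((1:Int) < d.getD i 0))).filter pcheck) := by
    rw [List.perm_ext_iff_of_nodup hndB hndA]
    intro v
    rw [hmemA v, List.mem_filter, hmemB v]
  exact PySem.List.sorted_eq_of_perm_of_pairwise_lt _ _ (fun x => x) hperm hpwB
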